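-- pv_equiv track=rewrite | github.com/SooDevv/Algorithm_Training | Hackerrank/30 Days of Code/Day6.py | review
-- ===== SOURCE A (Python) =====
-- def review(s):
--     # h a c k e r
--     odd = []
--     even = []
--     for i, c in enumerate(s):
--         if i % 2 == 0: #짝수
--             odd.append(s[i])
--         else:
--             even.append(s[i])
--     return ''.join(odd) + ' '+ ''.join(even)
-- ===== SOURCE B (Python) =====
-- def review(s):
--     # even-indexed chars first (A stores them in `odd`), then a space, then odd-indexed
--     return s[::2] + ' ' + s[1::2]
-- ===== Notes on version B (the rewrite author's own statement) =====
-- stated objective: idiomatic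
-- what changed: Replaces the enumerate loop with a modulo branch and two accumulator lists by two stride slices s[::2] and s[1::2] joined with a space.
import Mathlib
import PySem

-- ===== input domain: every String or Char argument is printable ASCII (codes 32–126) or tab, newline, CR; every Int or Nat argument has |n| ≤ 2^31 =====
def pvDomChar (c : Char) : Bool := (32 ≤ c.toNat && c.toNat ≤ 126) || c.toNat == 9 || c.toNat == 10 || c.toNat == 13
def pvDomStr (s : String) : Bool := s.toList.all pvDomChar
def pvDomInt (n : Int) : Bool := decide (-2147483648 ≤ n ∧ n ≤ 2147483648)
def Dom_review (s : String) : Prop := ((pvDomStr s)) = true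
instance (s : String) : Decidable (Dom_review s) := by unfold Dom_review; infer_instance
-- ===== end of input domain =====

-- B replaces A's enumerate loop with a modulo branch by two stride slices s[::2] and s[1::2] (idiomatic; same cost).

-- ===== PORT A =====
-- A's loop over enumerate(s); `s[i] = c` since i is the running index, so the append is of c.
def review (s : String) : String :=
  let p := (PySem.List.enumerate s.toList 0).foldl
    (fun (acc : List Char × List Char) ic =>
      if PySem.Int.mod ic.1 2 == 0 then (acc.1 ++ [ic.2], acc.2) else (acc.1, acc.2 ++ [ic.2]))
    ([], [])
  String.ofList (p.1 ++ ' ' :: p.2)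

-- ===== PORT B =====
-- stride-2 slice: PySem.List.slice has no step, so s[::2] is ported by hand, exact on all lists.
def stride2 {α : Type} : List α → List α
  | [] => []
  | c :: rest => c :: stride2 (rest.drop 1)
termination_by l => l.length
decreasing_by simp

def review_alt (s : String) : String :=
  String.ofList (stride2 s.toList ++ ' ' :: stride2 (s.toList.drop 1))

-- ===== PRECONDITION & SPEC =====
def Spec_review (s : String) (out : String) : Prop := out = review_alt s
instance (s : String) (out : String) : Decidable (Spec_review s out) := by unfold Spec_review; infer_instance

-- ===== CLAIM (what is proved, stated in full; the proofs are below) =====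
def Claim_equal_review : Prop := ∀ (s : String), Dom_review s → Spec_review s (review s)

-- ===== LEMMAS AND PROOFS =====
lemma stride2_nil {α : Type} : stride2 ([] : List α) = [] := by rw [stride2]

lemma stride2_cons {α : Type} (c : α) (l : List α) :
    stride2 (c :: l) = c :: stride2 (l.drop 1) := by rw [stride2]

lemma review_loop (l : List Char) : ∀ (n : Int) (a b : List Char), 0 ≤ n →
    (PySem.List.enumerate l n).foldl
      (fun (acc : List Char × List Char) ic =>
        if PySem.Int.mod ic.1 2 == 0 then (acc.1 ++ [ic.2], acc.2) else (acc.1, acc.2 ++ [ic.2]))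
      (a, b)
    = if PySem.Int.mod n 2 == 0 then (a ++ stride2 l, b ++ stride2 (l.drop 1))
      else (a ++ stride2 (l.drop 1), b ++ stride2 l) := by
  induction l with
  | nil => intro n a b _; simp [PySem.List.enumerate, stride2_nil]
  | cons c l ih =>
    intro n a b hn
    rw [PySem.List.enumerate_cons, List.foldl_cons]
    by_cases h : (2 : Int) ∣ n
    · have h1 : ¬ (2 : Int) ∣ (n + 1) := by omega
      have ih' := ih (n + 1) (a ++ [c]) b (by omega)
      simp [h, h1, stride2_cons, List.append_assoc] at ih' ⊢
      simp [ih']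
    · have h1 : (2 : Int) ∣ (n + 1) := by omega
      have ih' := ih (n + 1) a (b ++ [c]) (by omega)
      simp [h, h1, stride2_cons, List.append_assoc] at ih' ⊢
      simp [ih']

-- ===== VERDICT (by name: the statement is the Claim_ definition above) =====
theorem review_spec : Claim_equal_review := by
  intro s _
  unfold Spec_review review review_alt
  rw [review_loop s.toList 0 [] [] (by omega)]
  simp [PySem.Int.mod]
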